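-- pv_equiv track=rewrite | github.com/zenhakp/ByteBrains-AI-Translator | app.py | clean_translation
-- ===== SOURCE A (Python) =====
-- def clean_translation(raw_output):
--     import re
--
--     lines = raw_output.strip().splitlines()
--     cleaned_lines = []
--     skip_mode = False
--
--     junk_starters = [
--         "note:",
--         "explanation:",
--         "here is the corrected response",
--         "however, to follow",
--         "let me know",
--         "additional notes:",
--         "thank you",
--         "best regards",
--         "disclaimer:",
--         "context:",
--         "assistant:"
--     ]
--
--     for line in lines:
--         line_clean = line.rstrip()
--         if not line_clean.strip():
--             continue
--         if skip_mode:
--             continue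
--         if any(line_clean.lower().startswith(junk) for junk in junk_starters):
--             skip_mode = True
--             continue
--         cleaned_lines.append(line_clean)
--
--     return "\n".join(cleaned_lines).strip()
-- ===== SOURCE B (Python) =====
-- JUNK_STARTERS = [
--     "note:",
--     "explanation:",
--     "here is the corrected response",
--     "however, to follow",
--     "let me know",
--     "additional notes:",
--     "thank you",
--     "best regards",
--     "disclaimer:",
--     "context:",
--     "assistant:",
-- ]
--
--
-- def _is_junk(line):
--     low = line.lower()
--     return any(low.startswith(j) for j in JUNK_STARTERS)
--
--
-- def _keep(lines):
--     # early-terminating structural recursion: stops at the first junk line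
--     if not lines:
--         return []
--     head = lines[0].rstrip()
--     rest = lines[1:]
--     if not head.strip():
--         return _keep(rest)
--     if _is_junk(head):
--         return []
--     return [head] + _keep(rest)
--
--
-- def clean_translation(raw_output):
--     return "\n".join(_keep(raw_output.strip().splitlines())).strip()
-- ===== Notes on version B (the rewrite author's own statement) =====
-- stated objective: alternative
-- what changed: Replaces A's full-scan loop over all lines with a skip_mode flag by an early-terminating structural recursion that stops outright at the first junk line and builds the kept lines by cons.
import Mathlib
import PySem

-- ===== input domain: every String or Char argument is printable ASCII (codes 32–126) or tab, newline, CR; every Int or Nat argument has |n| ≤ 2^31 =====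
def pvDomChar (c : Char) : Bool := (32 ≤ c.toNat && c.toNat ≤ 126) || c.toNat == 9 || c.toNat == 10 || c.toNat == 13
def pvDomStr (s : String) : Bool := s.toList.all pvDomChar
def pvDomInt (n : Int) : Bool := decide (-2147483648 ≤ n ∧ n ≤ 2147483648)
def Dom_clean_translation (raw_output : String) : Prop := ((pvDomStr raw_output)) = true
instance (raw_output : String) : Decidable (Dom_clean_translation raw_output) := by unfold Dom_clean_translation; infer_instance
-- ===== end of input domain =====

-- B replaces A's full-scan loop with a skip_mode flag by an early-terminating structural recursion (alternative decomposition, same cost).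

-- ===== PORT A =====
def pvJunkStarters : List String :=
  ["note:", "explanation:", "here is the corrected response", "however, to follow",
   "let me know", "additional notes:", "thank you", "best regards",
   "disclaimer:", "context:", "assistant:"]

-- A's loop body: state = (cleaned_lines, skip_mode)
def pvStepA (st : List String × Bool) (line : String) : List String × Bool :=
  let line_clean := PySem.Str.rstrip line
  if PySem.Str.strip line_clean = "" then st
  else if st.2 then st
  else if pvJunkStarters.any (fun junk => PySem.Str.startswith (PySem.Str.lower line_clean) junk) then (st.1, true)
  else (st.1 ++ [line_clean], st.2)

def clean_translation (raw_output : String) : String :=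
  let lines := PySem.Str.splitlines (PySem.Str.strip raw_output)
  let res := lines.foldl pvStepA ([], false)
  PySem.Str.strip (PySem.Str.join "\n" res.1)

-- ===== PORT B =====
def pvIsJunk (line : String) : Bool :=
  pvJunkStarters.any (fun j => PySem.Str.startswith (PySem.Str.lower line) j)

-- B's _keep: early-terminating recursion over the line list
def pvKeep : List String → List String
  | [] => []
  | l :: rest =>
    let head := PySem.Str.rstrip l
    if PySem.Str.strip head = "" then pvKeep rest
    else if pvIsJunk head then []
    else [head] ++ pvKeep rest

def clean_translation_alt (raw_output : String) : String :=
  PySem.Str.strip (PySem.Str.join "\n" (pvKeep (PySem.Str.splitlines (PySem.Str.strip raw_output))))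

-- ===== PRECONDITION & SPEC =====
def Spec_clean_translation (raw_output : String) (out : String) : Prop := out = clean_translation_alt raw_output
instance (raw_output : String) (out : String) : Decidable (Spec_clean_translation raw_output out) := by unfold Spec_clean_translation; infer_instance

-- ===== CLAIM =====
def Claim_equal_clean_translation : Prop := ∀ (raw_output : String), Dom_clean_translation raw_output → Spec_clean_translation raw_output (clean_translation raw_output)

-- ===== LEMMAS AND PROOFS =====

-- once skip_mode is set, A's loop only discards: the accumulator never grows
theorem foldA_skip (ls : List String) (acc : List String) :
    ls.foldl pvStepA (acc, true) = (acc, true) := by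
  induction ls generalizing acc with
  | nil => rfl
  | cons l t ih =>
      simp only [List.foldl_cons, pvStepA]
      split_ifs <;> exact ih acc

-- the junk test in A's loop body is B's pvIsJunk, definitionally
theorem pvAnyJunk_eq (x : String) :
    (pvJunkStarters.any fun junk => PySem.Str.startswith (PySem.Str.lower x) junk) = pvIsJunk x := rfl

-- A's loop from skip_mode = false produces exactly B's recursively kept lines
theorem foldA_eq (ls : List String) (acc : List String) :
    (ls.foldl pvStepA (acc, false)).1 = acc ++ pvKeep ls := by
  induction ls generalizing acc with
  | nil => simp [pvKeep]
  | cons l t ih =>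
      simp only [List.foldl_cons, pvStepA, pvKeep]
      by_cases hb : PySem.Str.strip (PySem.Str.rstrip l) = ""
      · simp [hb, ih]
      · rw [pvAnyJunk_eq]
        by_cases hj : pvIsJunk (PySem.Str.rstrip l)
        · simp [hb, hj, foldA_skip]
        · simp [hb, hj, ih]

-- ===== VERDICT =====
theorem clean_translation_spec : Claim_equal_clean_translation := by
  intro raw _
  unfold Spec_clean_translation clean_translation clean_translation_alt
  simp [foldA_eq]
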